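-- pv_equiv track=rewrite | github.com/sunyuzheng/srt-correction-web | app.py | split_srt_content
-- ===== SOURCE A (Python) =====
-- def split_srt_content(content, chunk_size=500):
--     """将SRT内容分割成较小的块"""
--     lines = content.split('\n')
--     chunks = []
--     current_chunk = []
--     line_count = 0
--
--     for line in lines:
--         current_chunk.append(line)
--         if line.strip() == '':
--             line_count += 1
--             if line_count >= chunk_size:
--                 chunks.append('\n'.join(current_chunk))
--                 current_chunk = []
--                 line_count = 0
--
--     if current_chunk:
--         chunks.append('\n'.join(current_chunk))
--
--     return chunks
-- ===== SOURCE B (Python) =====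
-- def split_srt_content(content, chunk_size=500):
--     """Chunk SRT text: precompute blank-line positions, cut at every chunk_size-th one, slice between cuts."""
--     lines = content.split('\n')
--     k = chunk_size if chunk_size > 0 else 1  # a non-positive size cuts at every blank line, as in the original
--     blanks = [i for i, line in enumerate(lines) if line.strip() == '']
--     cuts = [b for j, b in enumerate(blanks) if j % k == k - 1]
--     chunks = []
--     start = 0
--     for c in cuts:
--         chunks.append('\n'.join(lines[start:c + 1]))
--         start = c + 1
--     if start < len(lines):
--         chunks.append('\n'.join(lines[start:]))
--     return chunks
-- ===== Notes on version B (the rewrite author's own statement) =====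
-- stated objective: alternative
-- what changed: Instead of one pass that accumulates lines and a blank counter, B precomputes the indices of blank lines, selects every chunk_size-th one as a cut boundary, and emits the chunks as joined slices between consecutive boundaries.
import Mathlib
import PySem

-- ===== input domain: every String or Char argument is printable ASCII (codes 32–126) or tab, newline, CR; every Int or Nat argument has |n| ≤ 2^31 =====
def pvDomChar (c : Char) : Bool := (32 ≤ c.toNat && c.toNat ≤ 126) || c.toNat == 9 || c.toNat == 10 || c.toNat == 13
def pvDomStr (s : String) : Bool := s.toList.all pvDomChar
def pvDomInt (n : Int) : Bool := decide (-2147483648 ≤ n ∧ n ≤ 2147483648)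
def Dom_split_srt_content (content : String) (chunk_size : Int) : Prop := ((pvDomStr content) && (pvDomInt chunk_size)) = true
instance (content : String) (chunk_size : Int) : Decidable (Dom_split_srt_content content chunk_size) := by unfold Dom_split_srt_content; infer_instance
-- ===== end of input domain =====

-- B replaces A's single accumulating pass (line buffer + blank counter) by: collect blank-line
-- indices, pick every chunk_size-th as a cut, emit joined slices between cuts (objective: alternative).

-- ===== PORT A =====
-- content.split('\n') never raises for a nonempty separator, so split? is always `some`; .getD [] is exact.
-- loop body of A's for-loop, as a helper
def pvStepA (cs : Int) (s : List String × List String × Int) (line : String) :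
    List String × List String × Int :=
  let cur := s.2.1 ++ [line]
  if PySem.Str.strip line == "" then
    let cnt := s.2.2 + 1
    if cnt ≥ cs then (s.1 ++ [PySem.Str.join "\n" cur], ([] : List String), (0 : Int))
    else (s.1, cur, cnt)
  else (s.1, cur, s.2.2)

def split_srt_content (content : String) (chunk_size : Int) : List String :=
  let lines := (PySem.Str.split? content "\n").getD []
  let s : List String × List String × Int := lines.foldl (pvStepA chunk_size) ([], [], 0)
  if s.2.1 ≠ [] then s.1 ++ [PySem.Str.join "\n" s.2.1] else s.1

-- ===== PORT B =====
-- loop body of B's for-loop over the cut indices, as a helper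
def pvStepB (lines : List String) (acc : List String × Int) (c : Int) : List String × Int :=
  (acc.1 ++ [PySem.Str.join "\n" (PySem.List.slice lines (some acc.2) (some (c + 1)))], c + 1)

def split_srt_content_alt (content : String) (chunk_size : Int) : List String :=
  let lines := (PySem.Str.split? content "\n").getD []
  let k : Int := if 0 < chunk_size then chunk_size else 1
  let blanks : List Int := (PySem.List.enumerate lines).filterMap
      (fun il => if PySem.Str.strip il.2 == "" then some il.1 else none)
  let cuts : List Int := (PySem.List.enumerate blanks).filterMap
      (fun jb => if PySem.Int.mod jb.1 k == k - 1 then some jb.2 else none)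
  let t : List String × Int := cuts.foldl (pvStepB lines) ([], 0)
  if t.2 < (lines.length : Int) then
    t.1 ++ [PySem.Str.join "\n" (PySem.List.slice lines (some t.2) none)]
  else t.1

-- ===== PRECONDITION & SPEC =====
def Spec_split_srt_content (content : String) (chunk_size : Int) (out : List String) : Prop := out = split_srt_content_alt content chunk_size
instance (content : String) (chunk_size : Int) (out : List String) : Decidable (Spec_split_srt_content content chunk_size out) := by unfold Spec_split_srt_content; infer_instance

-- ===== CLAIM (what is proved, stated in full; the proofs are below) =====
def Claim_equal_split_srt_content : Prop := ∀ (content : String) (chunk_size : Int), Dom_split_srt_content content chunk_size → Spec_split_srt_content content chunk_size (split_srt_content content chunk_size)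

-- ===== LEMMAS AND PROOFS =====

-- Common recursive reference semantics: A's pass with a Nat counter.
def pvGoA (p : String → Bool) (k : Nat) : List String → List String → Nat → List String
  | [], cur, _ => if cur ≠ [] then [PySem.Str.join "\n" cur] else []
  | l :: ls, cur, c =>
    if p l then
      (if k ≤ c + 1 then PySem.Str.join "\n" (cur ++ [l]) :: pvGoA p k ls [] 0
       else pvGoA p k ls (cur ++ [l]) (c + 1))
    else pvGoA p k ls (cur ++ [l]) c

-- Nat-level pictures of B's three stages.
def pvNB (p : String → Bool) : List String → Nat → List Nat
  | [], _ => []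
  | l :: ls, i => if p l then i :: pvNB p ls (i + 1) else pvNB p ls (i + 1)

def pvSel (k : Nat) : List Nat → Nat → List Nat
  | [], _ => []
  | b :: bs, j => if j % k = k - 1 then b :: pvSel k bs (j + 1) else pvSel k bs (j + 1)

def pvBF (lines : List String) : List Nat → Nat → List String
  | [], s => if s < lines.length then [PySem.Str.join "\n" (lines.drop s)] else []
  | c :: cs, s => PySem.Str.join "\n" ((lines.drop s).take (c + 1 - s)) :: pvBF lines cs (c + 1)

lemma pvA_fold (cs : Int) (k : Nat) (hk : ∀ n : Nat, ((n : Int) + 1 ≥ cs ↔ k ≤ n + 1)) :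
    ∀ (ls : List String) (chunks cur : List String) (c : Nat),
    (if (ls.foldl (pvStepA cs) (chunks, cur, (c : Int))).2.1 ≠ [] then
      (ls.foldl (pvStepA cs) (chunks, cur, (c : Int))).1
        ++ [PySem.Str.join "\n" (ls.foldl (pvStepA cs) (chunks, cur, (c : Int))).2.1]
    else (ls.foldl (pvStepA cs) (chunks, cur, (c : Int))).1)
    = chunks ++ pvGoA (fun l => PySem.Str.strip l == "") k ls cur c := by
  intro ls
  induction ls with
  | nil =>
    intro chunks cur c
    simp only [List.foldl_nil, pvGoA]
    by_cases h : cur ≠ [] <;> simp [h]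
  | cons l ls ih =>
    intro chunks cur c
    rw [List.foldl_cons]
    by_cases hp : (PySem.Str.strip l == "") = true
    · by_cases hc : k ≤ c + 1
      · have hcs : ((c : Int) + 1 ≥ cs) := (hk c).mpr hc
        have hstep : pvStepA cs (chunks, cur, (c : Int)) l
            = (chunks ++ [PySem.Str.join "\n" (cur ++ [l])], ([] : List String),
               ((0 : Nat) : Int)) := by
          simp [pvStepA, hp, hcs]
        rw [hstep, ih, pvGoA]
        simp [hp, hc]
      · have hcs : ¬ ((c : Int) + 1 ≥ cs) := fun h => hc ((hk c).mp h)
        have hstep : pvStepA cs (chunks, cur, (c : Int)) l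
            = (chunks, cur ++ [l], ((c + 1 : Nat) : Int)) := by
          simp [pvStepA, hp, hcs]
        rw [hstep, ih, pvGoA]
        simp [hp, hc]
    · have hstep : pvStepA cs (chunks, cur, (c : Int)) l
          = (chunks, cur ++ [l], ((c : Nat) : Int)) := by
        simp [pvStepA, hp]
      rw [hstep, ih, pvGoA]
      simp [hp]

lemma pvNB_bridge (p : String → Bool) :
    ∀ (ls : List String) (i : Nat),
    (PySem.List.enumerate ls (i : Int)).filterMap (fun il => if p il.2 then some il.1 else none)
      = (pvNB p ls i).map (Nat.cast : Nat → Int) := by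
  intro ls
  induction ls with
  | nil => intro i; simp [PySem.List.enumerate_nil, pvNB]
  | cons l ls ih =>
    intro i
    rw [PySem.List.enumerate_cons, List.filterMap_cons]
    have h1 : ((i : Int) + 1) = ((i + 1 : Nat) : Int) := by push_cast; ring
    rw [h1, ih]
    by_cases hp : p l = true
    · simp [pvNB, hp]
    · simp [pvNB, hp]

lemma pvSel_bridge (k : Nat) (hk : 1 ≤ k) :
    ∀ (bs : List Nat) (j : Nat),
    (PySem.List.enumerate (bs.map (Nat.cast : Nat → Int)) (j : Int)).filterMap
        (fun jb => if PySem.Int.mod jb.1 (k : Int) == (k : Int) - 1 then some jb.2 else none)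
      = (pvSel k bs j).map (Nat.cast : Nat → Int) := by
  intro bs
  induction bs with
  | nil => intro j; simp [PySem.List.enumerate_nil, pvSel]
  | cons b bs ih =>
    intro j
    rw [List.map_cons, PySem.List.enumerate_cons]
    have hm : PySem.Int.mod (j : Int) (k : Int) = ((j % k : Nat) : Int) :=
      PySem.Int.mod_natCast j k
    have h1 : ((j : Int) + 1) = ((j + 1 : Nat) : Int) := by push_cast; ring
    have hiff : (((j % k : Nat) : Int) = (k : Int) - 1) ↔ (j % k = k - 1) := by omega
    by_cases hc : j % k = k - 1
    · have : (PySem.Int.mod (j : Int) (k : Int) == (k : Int) - 1) = true := by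
        rw [hm]; exact beq_iff_eq.mpr (hiff.mpr hc)
      rw [List.filterMap_cons, h1, ih]
      simp [pvSel, hc]
      rw [if_pos (show ((k - 1 : Nat) : Int) = (k : Int) - 1 by omega)]
    · have : (PySem.Int.mod (j : Int) (k : Int) == (k : Int) - 1) = false := by
        rw [hm]; exact beq_eq_false_iff_ne.mpr (fun h => hc (hiff.mp h))
      rw [List.filterMap_cons, h1, ih]
      simp [pvSel, hc]
      rw [← Int.natCast_mod, if_neg (by omega)]

lemma pvBF_bridge (lines : List String) :
    ∀ (cs : List Nat) (acc : List String) (s : Nat),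
    (if ((cs.map (Nat.cast : Nat → Int)).foldl (pvStepB lines) (acc, (s : Int))).2
        < (lines.length : Int) then
      ((cs.map (Nat.cast : Nat → Int)).foldl (pvStepB lines) (acc, (s : Int))).1
        ++ [PySem.Str.join "\n" (PySem.List.slice lines
            (some ((cs.map (Nat.cast : Nat → Int)).foldl (pvStepB lines) (acc, (s : Int))).2) none)]
    else ((cs.map (Nat.cast : Nat → Int)).foldl (pvStepB lines) (acc, (s : Int))).1)
    = acc ++ pvBF lines cs s := by
  intro cs
  induction cs with
  | nil =>
    intro acc s
    simp only [List.map_nil, List.foldl_nil, pvBF]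
    rw [PySem.List.slice_from_natCast]
    by_cases h : s < lines.length
    · rw [if_pos (by exact_mod_cast h), if_pos h]
    · rw [if_neg (by exact_mod_cast h), if_neg h, List.append_nil]
  | cons c cs ih =>
    intro acc s
    rw [List.map_cons, List.foldl_cons]
    have hstep : pvStepB lines (acc, (s : Int)) (c : Int)
        = (acc ++ [PySem.Str.join "\n" ((lines.drop s).take (c + 1 - s))],
           ((c + 1 : Nat) : Int)) := by
      have h1 : ((c : Int) + 1) = ((c + 1 : Nat) : Int) := by push_cast; ring
      simp only [pvStepB, h1, PySem.List.slice_natCast]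
    rw [hstep, ih]
    simp [pvBF]

lemma pvNB_append (p : String → Bool) :
    ∀ (xs ys : List String) (i : Nat),
    pvNB p (xs ++ ys) i = pvNB p xs i ++ pvNB p ys (i + xs.length) := by
  intro xs
  induction xs with
  | nil => intro ys i; simp [pvNB]
  | cons x xs ih =>
    intro ys i
    by_cases hp : p x = true
    · simp [pvNB, hp, ih]; ring_nf
    · simp [pvNB, hp, ih]; ring_nf

lemma length_pvNB (p : String → Bool) :
    ∀ (ls : List String) (i : Nat), (pvNB p ls i).length = ls.countP p := by
  intro ls
  induction ls with
  | nil => intro i; simp [pvNB]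
  | cons l ls ih =>
    intro i
    by_cases hp : p l = true <;> simp [pvNB, hp, ih]

lemma pvNB_shift (p : String → Bool) :
    ∀ (ls : List String) (i d : Nat), pvNB p ls (i + d) = (pvNB p ls i).map (· + d) := by
  intro ls
  induction ls with
  | nil => intro i d; simp [pvNB]
  | cons l ls ih =>
    intro i d
    have h : i + d + 1 = (i + 1) + d := by omega
    by_cases hp : p l = true <;> simp [pvNB, hp, h, ih]

lemma pvSel_small (k : Nat) :
    ∀ (bs : List Nat) (j : Nat), j + bs.length < k → pvSel k bs j = [] := by
  intro bs
  induction bs with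
  | nil => intro j _; simp [pvSel]
  | cons b bs ih =>
    intro j h
    simp only [List.length_cons] at h
    have hj : j % k = j := Nat.mod_eq_of_lt (by omega)
    have hne : ¬ (j % k = k - 1) := by omega
    simp [pvSel, hne, ih j.succ (by omega)]

lemma pvSel_shift (k : Nat) :
    ∀ (bs : List Nat) (j : Nat), pvSel k bs (j + k) = pvSel k bs j := by
  intro bs
  induction bs with
  | nil => intro j; simp [pvSel]
  | cons b bs ih =>
    intro j
    have hm : (j + k) % k = j % k := Nat.add_mod_right j k
    have h1 : j + k + 1 = (j + 1) + k := by omega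
    simp only [pvSel, hm, h1, ih]

lemma pvSel_prefix (k : Nat) (hk : 1 ≤ k) :
    ∀ (bs1 : List Nat) (b : Nat) (bs2 : List Nat) (j : Nat), j + bs1.length = k - 1 →
    pvSel k (bs1 ++ b :: bs2) j = b :: pvSel k bs2 0 := by
  intro bs1
  induction bs1 with
  | nil =>
    intro b bs2 j h
    simp only [List.length_nil, Nat.add_zero] at h
    subst h
    have hc : (k - 1) % k = k - 1 := Nat.mod_eq_of_lt (by omega)
    have hs : k - 1 + 1 = 0 + k := by omega
    simp only [List.nil_append, pvSel, hc, hs, pvSel_shift k]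
    simp
  | cons a bs1 ih =>
    intro b bs2 j h
    simp only [List.length_cons] at h
    have hj : j % k = j := Nat.mod_eq_of_lt (by omega)
    have hne : ¬ (j % k = k - 1) := by omega
    simp only [List.cons_append, pvSel, hne, if_false, ih b bs2 (j + 1) (by omega)]

lemma pvSel_map (k : Nat) :
    ∀ (bs : List Nat) (j d : Nat), pvSel k (bs.map (· + d)) j = (pvSel k bs j).map (· + d) := by
  intro bs
  induction bs with
  | nil => intro j d; simp [pvSel]
  | cons b bs ih =>
    intro j d
    by_cases hc : j % k = k - 1 <;> simp [pvSel, hc, ih]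

lemma pvGoA_small (p : String → Bool) (k : Nat) :
    ∀ (ls : List String) (cur : List String) (c : Nat), c + ls.countP p < k →
    pvGoA p k ls cur c =
      if cur ++ ls ≠ [] then [PySem.Str.join "\n" (cur ++ ls)] else [] := by
  intro ls
  induction ls with
  | nil => intro cur c _; simp [pvGoA]
  | cons l ls ih =>
    intro cur c h
    rw [List.countP_cons] at h
    by_cases hp : p l = true
    · have hc : ¬ (k ≤ c + 1) := by simp [hp] at h; omega
      rw [pvGoA, if_pos hp, if_neg hc, ih (cur ++ [l]) (c + 1) (by simp [hp] at h; omega)]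
      simp
    · rw [pvGoA, if_neg hp, ih (cur ++ [l]) c (by simp [hp] at h; omega)]
      simp

lemma pvGoA_flush (p : String → Bool) (k : Nat) (b : String) (v : List String)
    (hb : p b = true) :
    ∀ (u : List String) (cur : List String) (c : Nat), c + u.countP p = k - 1 → 1 ≤ k →
    pvGoA p k (u ++ b :: v) cur c
      = PySem.Str.join "\n" (cur ++ u ++ [b]) :: pvGoA p k v [] 0 := by
  intro u
  induction u with
  | nil =>
    intro cur c h hk
    simp only [List.countP_nil, Nat.add_zero] at h
    rw [List.nil_append, pvGoA, if_pos hb, if_pos (by omega)]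
    simp
  | cons a u ih =>
    intro cur c h hk
    rw [List.countP_cons] at h
    by_cases hp : p a = true
    · have hc : ¬ (k ≤ c + 1) := by simp [hp] at h; omega
      rw [List.cons_append, pvGoA, if_pos hp, if_neg hc,
        ih (cur ++ [a]) (c + 1) (by simp [hp] at h; omega) hk]
      simp
    · rw [List.cons_append, pvGoA, if_neg hp,
        ih (cur ++ [a]) c (by simp [hp] at h; omega) hk]
      simp

lemma exists_kth_blank (p : String → Bool) :
    ∀ (ls : List String) (k : Nat), 1 ≤ k → k ≤ ls.countP p →
    ∃ u b v, ls = u ++ b :: v ∧ p b = true ∧ u.countP p = k - 1 := by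
  intro ls
  induction ls with
  | nil => intro k hk h; simp at h; omega
  | cons l ls ih =>
    intro k hk h
    rw [List.countP_cons] at h
    by_cases hp : p l = true
    · by_cases h1 : k = 1
      · exact ⟨[], l, ls, by simp, hp, by simp [h1]⟩
      · obtain ⟨u, b, v, hls, hb, hcu⟩ := ih (k - 1) (by omega) (by simp [hp] at h; omega)
        exact ⟨l :: u, b, v, by rw [hls]; rfl, hb,
          by rw [List.countP_cons]; simp [hp]; omega⟩
    · obtain ⟨u, b, v, hls, hb, hcu⟩ := ih k hk (by simp [hp] at h; omega)
      exact ⟨l :: u, b, v, by rw [hls]; rfl, hb,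
        by rw [List.countP_cons]; simp [hp]; omega⟩

lemma pvBF_shift (w v : List String) :
    ∀ (cs : List Nat) (s : Nat),
    pvBF (w ++ v) (cs.map (· + w.length)) (s + w.length) = pvBF v cs s := by
  intro cs
  induction cs with
  | nil =>
    intro s
    simp only [List.map_nil, pvBF, List.length_append]
    have hd : (w ++ v).drop (s + w.length) = v.drop s := by
      rw [Nat.add_comm, List.drop_append]
      rw [List.drop_eq_nil_of_le (by omega), List.nil_append]
      congr 1
      omega
    by_cases h : s < v.length
    · rw [if_pos (by omega), if_pos h, hd]
    · rw [if_neg (by omega), if_neg h]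
  | cons c cs ih =>
    intro s
    simp only [List.map_cons, pvBF]
    have hd : (w ++ v).drop (s + w.length) = v.drop s := by
      rw [Nat.add_comm, List.drop_append]
      rw [List.drop_eq_nil_of_le (by omega), List.nil_append]
      congr 1
      omega
    have ha : c + w.length + 1 - (s + w.length) = c + 1 - s := by omega
    have hs : c + w.length + 1 = (c + 1) + w.length := by omega
    rw [hd, ha, hs, ih]

lemma pvMain (p : String → Bool) (k : Nat) (hk : 1 ≤ k) :
    ∀ (N : Nat) (ls : List String), ls.length ≤ N →
    pvBF ls (pvSel k (pvNB p ls 0) 0) 0 = pvGoA p k ls [] 0 := by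
  intro N
  induction N with
  | zero =>
    intro ls h
    have : ls = [] := List.eq_nil_of_length_eq_zero (by omega)
    subst this
    simp [pvNB, pvSel, pvBF, pvGoA]
  | succ N ih =>
    intro ls hlen
    by_cases hcnt : k ≤ ls.countP p
    · obtain ⟨u, b, v, hls, hb, hcu⟩ := exists_kth_blank p ls k hk hcnt
      subst hls
      have hnb : pvNB p (u ++ b :: v) 0 =
          pvNB p u 0 ++ u.length :: (pvNB p v 0).map (· + (u.length + 1)) := by
        rw [pvNB_append]
        have : pvNB p (b :: v) (0 + u.length) = u.length :: pvNB p v (u.length + 1) := by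
          simp [pvNB, hb]
        rw [this]
        have : pvNB p v (u.length + 1) = (pvNB p v 0).map (· + (u.length + 1)) := by
          have := pvNB_shift p v 0 (u.length + 1)
          simpa using this
        rw [this]
      have hsel : pvSel k (pvNB p (u ++ b :: v) 0) 0 =
          u.length :: (pvSel k (pvNB p v 0) 0).map (· + (u.length + 1)) := by
        rw [hnb, pvSel_prefix k hk _ _ _ 0 (by simp [length_pvNB, hcu]), pvSel_map]
      rw [hsel]
      have htake : ((u ++ b :: v).drop 0).take (u.length + 1 - 0) = u ++ [b] := by
        simp only [List.drop_zero, Nat.sub_zero]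
        rw [List.take_length_add_append]
        simp
      have hw : (u ++ b :: v) = (u ++ [b]) ++ v := by simp
      have hwl : (u ++ [b]).length = u.length + 1 := by simp
      rw [pvBF, htake]
      have hshift : pvBF (u ++ b :: v) ((pvSel k (pvNB p v 0) 0).map (· + (u.length + 1)))
          (u.length + 1) = pvBF v (pvSel k (pvNB p v 0) 0) 0 := by
        rw [hw]
        have := pvBF_shift (u ++ [b]) v (pvSel k (pvNB p v 0) 0) 0
        rw [hwl] at this
        simpa using this
      rw [hshift, ih v (by simp at hlen; omega)]
      rw [pvGoA_flush p k b v hb u [] 0 (by simpa using hcu) hk]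
      simp
    · have hsel : pvSel k (pvNB p ls 0) 0 = [] :=
        pvSel_small k _ 0 (by rw [length_pvNB]; omega)
      rw [hsel, pvBF, pvGoA_small p k ls [] 0 (by omega)]
      by_cases h : ls = []
      · subst h; simp
      · rw [if_pos (by simp [List.length_pos_iff_ne_nil, h]), if_pos (by simp [h])]
        simp

-- ===== VERDICT (by name: the statement is the Claim_ definition above) =====
theorem split_srt_content_spec : Claim_equal_split_srt_content := by
  unfold Claim_equal_split_srt_content Spec_split_srt_content
  intro content chunk_size _hdom
  unfold split_srt_content split_srt_content_alt
  dsimp only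
  generalize (PySem.Str.split? content "\n").getD [] = lines
  set kN : Nat := if 0 < chunk_size then chunk_size.toNat else 1 with hkN
  have hk1 : 1 ≤ kN := by rw [hkN]; split <;> omega
  have hkInt : (if 0 < chunk_size then chunk_size else 1 : Int) = (kN : Int) := by
    rw [hkN]; by_cases h : 0 < chunk_size <;> simp [h] <;> omega
  have hcond : ∀ n : Nat, ((n : Int) + 1 ≥ chunk_size ↔ kN ≤ n + 1) := by
    intro n
    rw [hkN]; by_cases h : 0 < chunk_size <;> simp [h] <;> omega
  -- A side
  have hA := pvA_fold chunk_size kN hcond lines [] [] 0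
  simp only [Nat.cast_zero, List.nil_append] at hA
  rw [hA]
  -- B side
  have hblanks := pvNB_bridge (fun l => PySem.Str.strip l == "") lines 0
  simp only [Nat.cast_zero] at hblanks
  rw [hkInt, hblanks]
  have hcuts := pvSel_bridge kN hk1 (pvNB (fun l => PySem.Str.strip l == "") lines 0) 0
  simp only [Nat.cast_zero] at hcuts
  rw [hcuts]
  have hbf := pvBF_bridge lines (pvSel kN (pvNB (fun l => PySem.Str.strip l == "") lines 0) 0) [] 0
  simp only [Nat.cast_zero, List.nil_append] at hbf
  rw [hbf]
  exact (pvMain (fun l => PySem.Str.strip l == "") kN hk1 lines.length lines le_rfl).symm
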